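-- pv_equiv track=rewrite | github.com/PROxZIMA/Advent-of-Code | 2020/Day_06/day-6.py | part2
-- ===== SOURCE A (Python) =====
-- def part2(data_):
--     total = 0
--     d = ""
--
--     for line in iter(data_.splitlines()):
--         if line != "":
--             d += line + " "
--
--         else:
--             common = 0
--             for char in "abcdefghijklmnopqrstuvwxyz":
--                 if all(char in ans for ans in d.split()):
--                     common += 1
--
--             total += common
--             d = ""
--
--     return total
-- ===== SOURCE B (Python) =====
-- def _count(g):
--     common = set("abcdefghijklmnopqrstuvwxyz")
--     for word in " ".join(g).split():
--         common &= set(word)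
--     return len(common)
--
--
-- def part2(data_):
--     groups = []
--     cur = []
--     for line in data_.splitlines():
--         if line == "":
--             groups.append(cur)
--             cur = []
--         else:
--             cur.append(line)
--     return sum(_count(g) for g in groups)
-- ===== Notes on version B (the rewrite author's own statement) =====
-- stated objective: alternative
-- what changed: B works in two staged passes with a different data structure: it first builds the list of line-groups (lists of lines, trailing unterminated group dropped as in A), then sums a per-group count obtained by folding set intersection over the group's words (starting from the 26-letter alphabet set), instead of A's single pass that accumulates a growing string and scans all 26 letters with an all(...) test per letter.
import Mathlib
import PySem

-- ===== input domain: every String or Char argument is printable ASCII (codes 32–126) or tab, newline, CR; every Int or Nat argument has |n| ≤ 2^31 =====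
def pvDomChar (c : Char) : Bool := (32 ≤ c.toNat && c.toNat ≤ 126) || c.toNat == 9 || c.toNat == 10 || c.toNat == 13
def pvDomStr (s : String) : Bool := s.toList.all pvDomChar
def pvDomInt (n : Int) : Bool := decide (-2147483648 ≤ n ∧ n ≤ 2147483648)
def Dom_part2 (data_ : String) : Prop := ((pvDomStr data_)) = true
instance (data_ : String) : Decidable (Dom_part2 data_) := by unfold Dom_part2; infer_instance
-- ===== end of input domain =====

-- B restructures A into two staged passes over a different data structure: first the lines are
-- grouped into a list of line-groups (trailing unterminated group dropped, as in A), then each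
-- group's common-letter count is the size of a fold of set intersections over its words.


-- ===== PORT A =====
-- the string "abcdefghijklmnopqrstuvwxyz" as a character list (shared literal)
def pvAlphabet : List Char := "abcdefghijklmnopqrstuvwxyz".toList

-- one iteration of A's line loop: state = (total, d)
def part2_step (st : Int × List Char) (line : List Char) : Int × List Char :=
  if line ≠ [] then (st.1, st.2 ++ line ++ [' '])
  else
    let common : Int := pvAlphabet.foldl
      (fun cm c => if (PySem.Chars.split₀ st.2).all (fun ans => PySem.Chars.isIn [c] ans)
                   then cm + 1 else cm) 0
    (st.1 + common, [])

def part2 (data_ : String) : Int :=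
  ((PySem.Chars.splitlines data_.toList).foldl part2_step (0, [])).1

-- ===== PORT B =====
-- B's per-group count: intersect the alphabet set with set(word) for each word of " ".join(g).split()
def pvCount (g : List (List Char)) : Int :=
  PySem.Set.len
    ((PySem.Chars.split₀ (PySem.Chars.join [' '] g)).foldl
      (fun cm word => PySem.Set.inter cm (PySem.Set.ofList word))
      (PySem.Set.ofList pvAlphabet))

-- B's first pass: group the lines, flushing a group at each blank line (state = (groups, cur));
-- the trailing unterminated group 'cur' is dropped
def pvGroups (lines : List (List Char)) : List (List (List Char)) :=
  (lines.foldl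
    (fun (st : List (List (List Char)) × List (List Char)) line =>
      if line = [] then (st.1 ++ [st.2], []) else (st.1, st.2 ++ [line]))
    ([], [])).1

def part2_alt (data_ : String) : Int :=
  ((pvGroups (PySem.Chars.splitlines data_.toList)).map pvCount).sum

-- ===== PRECONDITION & SPEC =====
def Spec_part2 (data_ : String) (out : Int) : Prop := out = part2_alt data_
instance (data_ : String) (out : Int) : Decidable (Spec_part2 data_ out) := by unfold Spec_part2; infer_instance

-- ===== CLAIM (what is proved, stated in full; the proofs are below) =====
def Claim_equal_part2 : Prop := ∀ (data_ : String), Dom_part2 data_ → Spec_part2 data_ (part2 data_)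

-- ===== LEMMAS AND PROOFS =====

-- A's accumulated string for the pending group g: each line followed by one space
def pvFlat (g : List (List Char)) : List Char := (g.map (· ++ [' '])).flatten

-- 'c in ans' (single char) is list membership
lemma isIn_singleton_iff (c : Char) (ans : List Char) :
    PySem.Chars.isIn [c] ans = true ↔ c ∈ ans := by
  rw [PySem.Chars.isIn_iff_infix]
  constructor
  · rintro ⟨l, r, h⟩; subst h; simp
  · intro h
    obtain ⟨l, r, h⟩ := List.append_of_mem h
    exact ⟨l, r, by simp [h]⟩

-- B's intersection fold filters the start set by "in every word"
lemma inter_fold (ws : List (List Char)) (s : List Char) :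
    ws.foldl (fun cm w => PySem.Set.inter cm (PySem.Set.ofList w)) s
      = s.filter (fun c => ws.all (fun ans => PySem.Chars.isIn [c] ans)) := by
  induction ws generalizing s with
  | nil => simp
  | cons a ws ih =>
    rw [List.foldl_cons, ih]
    simp only [PySem.Set.inter, List.filter_filter]
    congr 1
    funext c
    have hc : (PySem.Set.ofList a).contains c = PySem.Chars.isIn [c] a := by
      rw [Bool.eq_iff_iff, PySem.Set.contains_iff, isIn_singleton_iff, PySem.Set.mem_ofList]
    rw [List.all_cons, hc, Bool.and_comm]

-- a trailing space does not change split()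
lemma split₀_go_trailing (x cur acc) :
    PySem.Chars.split₀.go (x ++ [' ']) cur acc = PySem.Chars.split₀.go x cur acc := by
  induction x generalizing cur acc with
  | nil =>
    have hsp : PySem.Chars.isspace ' ' = true := by decide
    simp only [List.nil_append, PySem.Chars.split₀.go, hsp, if_true]
    split <;> rfl
  | cons c x ih =>
    simp only [List.cons_append, PySem.Chars.split₀.go]
    split
    · split <;> exact ih _ _
    · exact ih _ _

lemma split₀_trailing (x : List Char) :
    PySem.Chars.split₀ (x ++ [' ']) = PySem.Chars.split₀ x :=
  split₀_go_trailing x [] []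

-- A's accumulated string splits into the same words as B's " ".join of the group
lemma split₀_flat (g : List (List Char)) :
    PySem.Chars.split₀ (pvFlat g) = PySem.Chars.split₀ (PySem.Chars.join [' '] g) := by
  suffices h : g = [] ∨ pvFlat g = PySem.Chars.join [' '] g ++ [' '] by
    rcases h with h | h
    · subst h; rfl
    · rw [h, split₀_trailing]
  induction g with
  | nil => exact Or.inl rfl
  | cons a g ih =>
    right
    rcases ih with h | h
    · subst h; simp [pvFlat, PySem.Chars.join, List.intercalate]
    · cases g with
      | nil => simp [pvFlat, PySem.Chars.join, List.intercalate] at h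
      | cons b g =>
        simp only [pvFlat, List.map_cons, List.flatten_cons] at h ⊢
        rw [h, PySem.Chars.join, PySem.Chars.join]
        simp [List.intercalate]

-- A's 26-letter scan over the pending string equals B's per-group count
lemma count_eq (g : List (List Char)) :
    pvAlphabet.foldl
      (fun cm c => if (PySem.Chars.split₀ (pvFlat g)).all (fun ans => PySem.Chars.isIn [c] ans)
                   then cm + 1 else cm) 0
      = pvCount g := by
  rw [pvCount, inter_fold, split₀_flat, PySem.List.foldl_if_add_one]
  have hnd : pvAlphabet.Nodup := by decide
  rw [PySem.Set.ofList_eq_self_of_nodup _ hnd]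
  simp [PySem.Set.len, List.countP_eq_length_filter]

-- joint loop invariant: A's running total vs B's accumulated groups and pending group
lemma main_inv (L : List (List Char)) (t : Int) (gs : List (List (List Char)))
    (g : List (List Char)) :
    (L.foldl part2_step (t, pvFlat g)).1 + (gs.map pvCount).sum
      = t + (((L.foldl
          (fun (st : List (List (List Char)) × List (List Char)) line =>
            if line = [] then (st.1 ++ [st.2], []) else (st.1, st.2 ++ [line]))
          (gs, g)).1).map pvCount).sum := by
  induction L generalizing t gs g with
  | nil => simp
  | cons line L ih =>
    by_cases h : line = []
    · subst h
      have hA : part2_step (t, pvFlat g) [] = (t + pvCount g, []) := by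
        rw [part2_step, if_neg (by simp), ← count_eq]
      rw [List.foldl_cons, List.foldl_cons, hA, if_pos rfl]
      have h2 := ih (t + pvCount g) (gs ++ [g]) []
      simp only [pvFlat, List.map_nil, List.flatten_nil, List.map_append, List.map_cons,
        List.sum_append, List.sum_cons, List.sum_nil] at h2 ⊢
      linarith [h2]
    · have hA : part2_step (t, pvFlat g) line = (t, pvFlat (g ++ [line])) := by
        simp [part2_step, h, pvFlat]
      rw [List.foldl_cons, List.foldl_cons, hA, if_neg h]
      exact ih t gs (g ++ [line])

-- ===== VERDICT (by name: the statement is the Claim_ definition above) =====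
theorem part2_spec : Claim_equal_part2 := by
  intro data_ _
  unfold Spec_part2 part2 part2_alt pvGroups
  have h := main_inv (PySem.Chars.splitlines data_.toList) 0 [] []
  simpa [pvFlat] using h
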